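-- pv_equiv track=rewrite | github.com/pedromdsduarte/IST-Projects | Information Processing and Retrieval/Project/group19 - project2/group19 - project2/exercise04.py | union_similiar_terms
-- ===== SOURCE A (Python) =====
-- def union_similiar_terms(dic):
--     correlated_terms = []
--     already_compared = []
--     for phrase, value in dic.items():
--         for comparing_phrase, val in dic.items():
--             if ((phrase,comparing_phrase) in already_compared) or ((comparing_phrase,phrase) in already_compared) :
--                 continue
--             else :
--                 if levenshteinDistance(phrase,comparing_phrase) == 1 :
--                     correlated_terms.append((phrase, comparing_phrase))
--
--             already_compared.append((phrase,comparing_phrase))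
--             already_compared.append((comparing_phrase,phrase))
--
--     return correlated_terms
--
-- def levenshteinDistance(s1, s2):
--     if len(s1) > len(s2):
--         s1, s2 = s2, s1
--
--     distances = range(len(s1) + 1)
--     for i2, c2 in enumerate(s2):
--         distances_ = [i2+1]
--         for i1, c1 in enumerate(s1):
--             if c1 == c2:
--                 distances_.append(distances[i1])
--             else:
--                 distances_.append(1 + min((distances[i1], distances[i1 + 1], distances_[-1])))
--         distances = distances_
--     return distances[-1]
-- ===== SOURCE B (Python) =====
-- # B: single triangular pass over the (already unique) keys, no already_compared
-- # bookkeeping; rolling-row Levenshtein with a running 'last' accumulator.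
--
-- def _lev(a, b):
--     if len(a) > len(b):
--         a, b = b, a
--     row = list(range(len(a) + 1))
--     for j, cb in enumerate(b):
--         last = j + 1
--         nxt = [last]
--         for ca, d, d1 in zip(a, row, row[1:]):
--             last = d if ca == cb else 1 + min(d, d1, last)
--             nxt.append(last)
--         row = nxt
--     return row[-1]
--
--
-- def union_similiar_terms(dic):
--     keys = list(dic)
--     out = []
--     for i, p in enumerate(keys):
--         for q in keys[i + 1:]:
--             if _lev(p, q) == 1:
--                 out.append((p, q))
--     return out
-- ===== Notes on version B (the rewrite author's own statement) =====
-- stated objective: faster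
-- what changed: B drops the O(n^2)-entry already_compared list and its linear membership scans, iterating each unordered key pair exactly once with a triangular index loop (and computes the Levenshtein row with a running last-value accumulator instead of repeated list indexing).
import Mathlib
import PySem

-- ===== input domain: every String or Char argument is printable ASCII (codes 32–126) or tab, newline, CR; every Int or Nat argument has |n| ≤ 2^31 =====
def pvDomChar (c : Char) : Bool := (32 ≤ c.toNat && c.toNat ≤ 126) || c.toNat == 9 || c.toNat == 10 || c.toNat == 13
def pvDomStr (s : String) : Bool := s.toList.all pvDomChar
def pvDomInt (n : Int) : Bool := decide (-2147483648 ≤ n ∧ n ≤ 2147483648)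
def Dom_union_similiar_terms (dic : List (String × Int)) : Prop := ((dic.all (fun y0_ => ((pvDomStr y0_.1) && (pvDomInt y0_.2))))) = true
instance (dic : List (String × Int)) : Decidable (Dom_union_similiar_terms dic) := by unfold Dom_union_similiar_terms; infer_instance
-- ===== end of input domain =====

-- B replaces A's quadratic `already_compared` membership bookkeeping by a single
-- triangular pass over the (unique) dict keys; same Levenshtein values, same output order.

-- ===== PORT A =====
-- inner loop of levenshteinDistance: walks s1 together with `distances`
-- (distances[i1], distances[i1+1]) and appends to distances_ (acc); distances_[-1] is pyGetD acc (-1)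
def levRowA (c2 : Char) : List Char → List Int → List Int → List Int
  | [], _, acc => acc
  | c1 :: s1, dist, acc =>
      let v := if c1 == c2 then PySem.List.pyGetD dist 0 0
               else 1 + min (PySem.List.pyGetD dist 0 0)
                        (min (PySem.List.pyGetD dist 1 0) (PySem.List.pyGetD acc (-1) 0))
      levRowA c2 s1 dist.tail (acc ++ [v])

-- outer loop: for i2, c2 in enumerate(s2)
def levOuterA (a : List Char) : List Char → Int → List Int → List Int
  | [], _, dist => dist
  | c2 :: b, i2, dist => levOuterA a b (i2 + 1) (levRowA c2 a dist [i2 + 1])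

def levenshteinDistance (s1 s2 : String) : Int :=
  let l1 := s1.toList
  let l2 := s2.toList
  let (a, b) := if l1.length > l2.length then (l2, l1) else (l1, l2)
  PySem.List.pyGetD (levOuterA a b 0 (PySem.List.pyRange 0 ((a.length : Int) + 1) 1)) (-1) 0

-- one inner-loop step of A's double loop (state = (correlated_terms, already_compared))
def stepA (p : String) (st : List (String × String) × List (String × String)) (q : String) :
    List (String × String) × List (String × String) :=
  if st.2.contains (p, q) || st.2.contains (q, p) then st
  else
    (if levenshteinDistance p q == 1 then st.1 ++ [(p, q)] else st.1,
     st.2 ++ [(p, q)] ++ [(q, p)])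

def union_similiar_terms (dic : List (String × Int)) : List (String × String) :=
  let keys := PySem.List.dedup (dic.map Prod.fst)   -- the dict's keys, in insertion order
  (keys.foldl (fun st p => keys.foldl (stepA p) st) ([], [])).1

-- ===== PORT B =====
-- B's row: fold over zip(a, row, row[1:]) carrying `last`
def levRowB (cb : Char) : List (Char × Int × Int) → Int → List Int → List Int
  | [], _, acc => acc
  | (ca, d, d1) :: rest, last, acc =>
      let v := if ca == cb then d else 1 + min d (min d1 last)
      levRowB cb rest v (acc ++ [v])

def levOuterB (a : List Char) : List Char → Int → List Int → List Int
  | [], _, row => row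
  | cb :: b, j, row => levOuterB a b (j + 1) (levRowB cb (a.zip (row.zip row.tail)) (j + 1) [j + 1])

def levB (s1 s2 : String) : Int :=
  let l1 := s1.toList
  let l2 := s2.toList
  let (a, b) := if l1.length > l2.length then (l2, l1) else (l1, l2)
  PySem.List.pyGetD (levOuterB a b 0 (PySem.List.pyRange 0 ((a.length : Int) + 1) 1)) (-1) 0

-- triangular loop: for i, p in enumerate(keys): for q in keys[i+1:]
def triB : List String → List (String × String) → List (String × String)
  | [], out => out
  | p :: rest, out =>
      triB rest (rest.foldl (fun o q => if levB p q == 1 then o ++ [(p, q)] else o) out)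

def union_similiar_terms_alt (dic : List (String × Int)) : List (String × String) :=
  triB (PySem.List.dedup (dic.map Prod.fst)) []

-- ===== PRECONDITION & SPEC =====
def Spec_union_similiar_terms (dic : List (String × Int)) (out : List (String × String)) : Prop := out = union_similiar_terms_alt dic
instance (dic : List (String × Int)) (out : List (String × String)) : Decidable (Spec_union_similiar_terms dic out) := by unfold Spec_union_similiar_terms; infer_instance

-- ===== CLAIM (what is proved, stated in full; the proofs are below) =====
def Claim_equal_union_similiar_terms : Prop := ∀ (dic : List (String × Int)), Dom_union_similiar_terms dic → Spec_union_similiar_terms dic (union_similiar_terms dic)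

-- ===== LEMMAS AND PROOFS =====

theorem rowA_length (c2 : Char) : ∀ (s1 : List Char) (dist acc : List Int),
    (levRowA c2 s1 dist acc).length = acc.length + s1.length := by
  intro s1
  induction s1 with
  | nil => simp [levRowA]
  | cons c1 s1 ih => intro dist acc; simp [levRowA, ih]; omega

theorem row_AB (c2 : Char) : ∀ (s1 : List Char) (dist acc : List Int) (last : Int),
    s1.length < dist.length → acc ≠ [] → PySem.List.pyGetD acc (-1) 0 = last →
    levRowA c2 s1 dist acc = levRowB c2 (s1.zip (dist.zip dist.tail)) last acc := by
  intro s1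
  induction s1 with
  | nil => intro dist acc last _ _ _; simp [levRowA, levRowB]
  | cons c1 s1 ih =>
    intro dist acc last hlen hne hlast
    obtain ⟨d0, rest0, rfl⟩ : ∃ d0 r, dist = d0 :: r := by
      cases dist with
      | nil => simp at hlen
      | cons a b => exact ⟨_, _, rfl⟩
    obtain ⟨d1, rest, rfl⟩ : ∃ d1 r, rest0 = d1 :: r := by
      cases rest0 with
      | nil => simp at hlen
      | cons a b => exact ⟨_, _, rfl⟩
    simp only [levRowA, levRowB, List.zip_cons_cons, List.tail_cons,
      PySem.List.pyGetD_zero_cons, hlast]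
    have h1 : PySem.List.pyGetD (d0 :: d1 :: rest) 1 0 = d1 := by
      simp [pysem]
    rw [h1]
    exact ih (d1 :: rest) _ _ (by simp at hlen ⊢; omega) (by simp)
      (PySem.List.pyGetD_neg_one_append_singleton ..)

theorem out_AB (a : List Char) : ∀ (b : List Char) (j : Int) (dist : List Int),
    dist.length = a.length + 1 → levOuterA a b j dist = levOuterB a b j dist := by
  intro b
  induction b with
  | nil => intro j dist _; rfl
  | cons c2 b ih =>
    intro j dist hlen
    simp only [levOuterA, levOuterB]
    rw [ih _ _ (by simp [rowA_length]; omega),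
      row_AB c2 a dist [j + 1] (j + 1) (by omega) (by simp) (by simp [pysem])]

theorem lev_AB (s t : String) : levenshteinDistance s t = levB s t := by
  unfold levenshteinDistance levB
  by_cases h : s.toList.length > t.toList.length <;>
    simp only [h, if_pos] <;>
    rw [out_AB] <;> simp [PySem.List.length_pyRange_one]

theorem rowA_prefix (c2 : Char) : ∀ (s1 : List Char) (dist acc : List Int) (i : Nat),
    i < acc.length → (levRowA c2 s1 dist acc)[i]? = acc[i]? := by
  intro s1
  induction s1 with
  | nil => intro dist acc i _; simp [levRowA]
  | cons c1 s1 ih =>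
    intro dist acc i hi
    simp only [levRowA]
    rw [ih _ _ _ (by simp; omega), List.getElem?_append_left hi]

theorem rowA_diag (c2 : Char) : ∀ (s1 : List Char) (dist acc : List Int) (k : Nat),
    k < dist.length → s1[k]? = some c2 →
    (levRowA c2 s1 dist acc)[acc.length + k]? = dist[k]? := by
  intro s1
  induction s1 with
  | nil => intro dist acc k _ h; simp at h
  | cons c1 s1 ih =>
    intro dist acc k hk hs
    obtain ⟨d0, rest, rfl⟩ : ∃ d0 r, dist = d0 :: r := by
      cases dist with
      | nil => simp at hk
      | cons a b => exact ⟨_, _, rfl⟩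
    cases k with
    | zero =>
      have hc : c1 = c2 := by simpa using hs
      simp only [levRowA, hc, beq_self_eq_true, if_true, PySem.List.pyGetD_zero_cons,
        List.tail_cons]
      rw [Nat.add_zero, rowA_prefix c2 s1 rest _ acc.length (by simp)]
      simp
    | succ k =>
      simp only [levRowA, List.tail_cons]
      have := ih rest (acc ++ [if c1 == c2 then PySem.List.pyGetD (d0 :: rest) 0 0
        else 1 + min (PySem.List.pyGetD (d0 :: rest) 0 0)
          (min (PySem.List.pyGetD (d0 :: rest) 1 0) (PySem.List.pyGetD acc (-1) 0))]) k
        (by simp at hk; omega) (by simpa using hs)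
      simpa [Nat.add_assoc, Nat.add_comm, Nat.add_left_comm] using this

theorem outerA_length (a : List Char) : ∀ (b : List Char) (j : Int) (dist : List Int),
    dist.length = a.length + 1 → (levOuterA a b j dist).length = a.length + 1 := by
  intro b
  induction b with
  | nil => intro j dist h; simpa [levOuterA] using h
  | cons c2 b ih =>
    intro j dist h
    simp only [levOuterA]
    exact ih _ _ (by simp [rowA_length]; omega)

theorem outer_diag (l : List Char) : ∀ (bsuf done : List Char) (j : Int) (dist : List Int),
    l = done ++ bsuf → dist.length = l.length + 1 → dist[done.length]? = some 0 →
    (levOuterA l bsuf j dist)[l.length]? = some 0 := by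
  intro bsuf
  induction bsuf with
  | nil => intro done j dist hl hlen h0; simp only [levOuterA]; simpa [hl] using h0
  | cons c2 bsuf ih =>
    intro done j dist hl hlen h0
    simp only [levOuterA]
    have hchar : l[done.length]? = some c2 := by
      rw [hl, List.getElem?_append_right (by omega)]
      simp
    have hklt : done.length < dist.length := by
      rw [hlen, hl]; simp
    have hdiag := rowA_diag c2 l dist [j + 1] done.length hklt hchar
    refine ih (done ++ [c2]) (j + 1) _ (by simpa using hl) (by simp [rowA_length]; omega) ?_
    rw [h0] at hdiag
    simpa [Nat.add_comm] using hdiag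

theorem lev_self (s : String) : levenshteinDistance s s = 0 := by
  unfold levenshteinDistance
  simp only [lt_irrefl, ite_false]
  have hlen0 : (PySem.List.pyRange 0 ((s.toList.length : Int) + 1) 1).length = s.toList.length + 1 := by
    simp [PySem.List.length_pyRange_one]
  have h0 : (PySem.List.pyRange 0 ((s.toList.length : Int) + 1) 1)[(0 : Nat)]? = some 0 := by
    rw [PySem.List.getElem?_pyRange_one]
    simp
  have hfin := outer_diag s.toList s.toList [] 0 _ (by simp) hlen0 h0
  have hflen := outerA_length s.toList s.toList 0 _ hlen0
  set final := levOuterA s.toList s.toList 0 (PySem.List.pyRange 0 ((s.toList.length : Int) + 1) 1) with hf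
  have hne : final ≠ [] := by
    intro h; rw [h] at hflen; simp at hflen
  rw [PySem.List.pyGetD_neg_one _ 0 hne, List.getLast_eq_getElem]
  have hidx : final.length - 1 = s.toList.length := by omega
  have h2 : final[final.length - 1]? = some 0 := by rw [hidx]; exact hfin
  rw [List.getElem?_eq_getElem (by omega)] at h2
  exact Option.some.inj h2

def AcChar (ks seen pdone : List String) (p : String) (ac : List (String × String)) : Prop :=
  ∀ x y : String, ((x, y) ∈ ac) ↔
    ((x ∈ seen ∧ y ∈ ks) ∨ (y ∈ seen ∧ x ∈ ks) ∨ (x = p ∧ y ∈ pdone) ∨ (y = p ∧ x ∈ pdone))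

def Ac0 (ks seen : List String) (ac : List (String × String)) : Prop :=
  ∀ x y : String, ((x, y) ∈ ac) ↔ ((x ∈ seen ∧ y ∈ ks) ∨ (y ∈ seen ∧ x ∈ ks))

theorem inner_spec (ks seen : List String) (p : String) (hnd : ks.Nodup) (hpks : p ∈ ks)
    (hpseen : p ∉ seen) :
    ∀ (qs pdone : List String) (out ac : List (String × String)),
      ks = pdone ++ qs → AcChar ks seen pdone p ac →
      ∃ ac', qs.foldl (stepA p) (out, ac) =
          (out ++ (qs.filter (fun q => !seen.contains q &&
              (levenshteinDistance p q == 1))).map (fun q => (p, q)), ac')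
        ∧ AcChar ks seen (pdone ++ qs) p ac' := by
  intro qs
  induction qs with
  | nil => intro pdone out ac hks hchar; exact ⟨ac, by simp, by simpa using hchar⟩
  | cons q qs ih =>
    intro pdone out ac hks hchar
    have hnd' := hks ▸ hnd
    rw [List.nodup_append'] at hnd'
    obtain ⟨hnd1, hnd2, hdisj⟩ := hnd'
    have hq_pd : q ∉ pdone := fun h => hdisj h (by simp)
    have hmemA : ((p, q) ∈ ac) ↔ q ∈ seen := by
      rw [hchar]
      constructor
      · rintro (⟨h, -⟩ | ⟨h, -⟩ | ⟨-, h⟩ | ⟨rfl, h⟩)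
        · exact absurd h hpseen
        · exact h
        · exact absurd h hq_pd
        · exact absurd h hq_pd
      · intro h; exact Or.inr (Or.inl ⟨h, hpks⟩)
    have hmemB : ((q, p) ∈ ac) ↔ q ∈ seen := by
      rw [hchar]
      constructor
      · rintro (⟨h, -⟩ | ⟨h, -⟩ | ⟨rfl, h⟩ | ⟨-, h⟩)
        · exact h
        · exact absurd h hpseen
        · exact absurd h hq_pd
        · exact absurd h hq_pd
      · intro h; exact Or.inl ⟨h, hpks⟩
    simp only [List.foldl_cons]
    by_cases hq : q ∈ seen
    · have hstep : stepA p (out, ac) q = (out, ac) := by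
        have hA : (p, q) ∈ ac := hmemA.mpr hq
        simp [stepA, hA]
      have hchar2 : AcChar ks seen (pdone ++ [q]) p ac := by
        intro x y
        rw [hchar x y]
        simp only [List.mem_append, List.mem_singleton]
        constructor
        · rintro (h | h | h | h)
          · exact Or.inl h
          · exact Or.inr (Or.inl h)
          · exact Or.inr (Or.inr (Or.inl ⟨h.1, Or.inl h.2⟩))
          · exact Or.inr (Or.inr (Or.inr ⟨h.1, Or.inl h.2⟩))
        · rintro (h | h | ⟨h1, (h2 | h2)⟩ | ⟨h1, (h2 | h2)⟩)
          · exact Or.inl h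
          · exact Or.inr (Or.inl h)
          · exact Or.inr (Or.inr (Or.inl ⟨h1, h2⟩))
          · exact Or.inr (Or.inl ⟨h2 ▸ hq, h1 ▸ hpks⟩)
          · exact Or.inr (Or.inr (Or.inr ⟨h1, h2⟩))
          · exact Or.inl ⟨h2 ▸ hq, h1 ▸ hpks⟩
      rw [hstep]
      obtain ⟨ac', hfold, hchar'⟩ := ih (pdone ++ [q]) out ac (by simpa using hks) hchar2
      refine ⟨ac', ?_, by simpa using hchar'⟩
      rw [hfold]
      have hpred : (!seen.contains q && (levenshteinDistance p q == 1)) = false := by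
        simp [hq]
      rw [List.filter_cons, hpred]
      simp
    · have hstep : stepA p (out, ac) q =
          ((if (levenshteinDistance p q == 1) = true then out ++ [(p, q)] else out),
            ac ++ [(p, q)] ++ [(q, p)]) := by
        have hA : (p, q) ∉ ac := fun h => hq (hmemA.mp h)
        have hB : (q, p) ∉ ac := fun h => hq (hmemB.mp h)
        simp [stepA, hA, hB]
      have hchar2 : AcChar ks seen (pdone ++ [q]) p (ac ++ [(p, q)] ++ [(q, p)]) := by
        intro x y
        rw [List.append_assoc, List.mem_append, hchar x y]
        simp only [List.mem_append, List.mem_cons, List.not_mem_nil,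
          or_false, Prod.mk.injEq]
        constructor
        · rintro ((h | h | h | h) | (h | h))
          · exact Or.inl h
          · exact Or.inr (Or.inl h)
          · exact Or.inr (Or.inr (Or.inl ⟨h.1, Or.inl h.2⟩))
          · exact Or.inr (Or.inr (Or.inr ⟨h.1, Or.inl h.2⟩))
          · exact Or.inr (Or.inr (Or.inl ⟨h.1, Or.inr h.2⟩))
          · exact Or.inr (Or.inr (Or.inr ⟨h.2, Or.inr h.1⟩))
        · rintro (h | h | ⟨h1, (h2 | h2)⟩ | ⟨h1, (h2 | h2)⟩)
          · exact Or.inl (Or.inl h)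
          · exact Or.inl (Or.inr (Or.inl h))
          · exact Or.inl (Or.inr (Or.inr (Or.inl ⟨h1, h2⟩)))
          · exact Or.inr (Or.inl ⟨h1, h2⟩)
          · exact Or.inl (Or.inr (Or.inr (Or.inr ⟨h1, h2⟩)))
          · exact Or.inr (Or.inr ⟨h2, h1⟩)
      rw [hstep]
      obtain ⟨ac', hfold, hchar'⟩ := ih (pdone ++ [q])
          (if (levenshteinDistance p q == 1) = true then out ++ [(p, q)] else out)
          (ac ++ [(p, q)] ++ [(q, p)]) (by simpa using hks) hchar2
      refine ⟨ac', ?_, by simpa using hchar'⟩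
      rw [hfold]
      have hpred : (!seen.contains q && (levenshteinDistance p q == 1))
          = (levenshteinDistance p q == 1) := by
        simp [hq]
      rw [List.filter_cons, hpred]
      by_cases hl : (levenshteinDistance p q == 1) = true
      · rw [if_pos hl, if_pos hl]
        simp
      · rw [if_neg hl, if_neg hl]

theorem triB_foldl (p : String) : ∀ (l : List String) (out : List (String × String)),
    l.foldl (fun o q => if levB p q == 1 then o ++ [(p, q)] else o) out
      = out ++ (l.filter (fun q => levB p q == 1)).map (fun q => (p, q)) := by
  intro l
  induction l with
  | nil => intro out; simp
  | cons q l ih =>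
    intro out
    simp only [List.foldl_cons, List.filter_cons]
    by_cases hl : (levB p q == 1) = true
    · rw [if_pos hl, if_pos hl, ih]
      simp
    · rw [if_neg hl, if_neg hl, ih]

theorem outer_spec (ks : List String) (hnd : ks.Nodup) :
    ∀ (rest seen : List String) (out ac : List (String × String)),
      ks = seen ++ rest → Ac0 ks seen ac →
      (rest.foldl (fun st p => ks.foldl (stepA p) st) (out, ac)).1 = triB rest out := by
  intro rest
  induction rest with
  | nil => intro seen out ac _ _; simp [triB]
  | cons p rest ih =>
    intro seen out ac hks hchar
    have hnd' := hks ▸ hnd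
    rw [List.nodup_append'] at hnd'
    obtain ⟨hnds, hndr, hdisj⟩ := hnd'
    have hpks : p ∈ ks := by rw [hks]; simp
    have hpseen : p ∉ seen := fun h => hdisj h (by simp)
    obtain ⟨ac', hfold, hchar'⟩ := inner_spec ks seen p hnd hpks hpseen ks [] out ac rfl
      (by intro x y; simpa using hchar x y)
    have hE : (ks.filter (fun q => !seen.contains q &&
          (levenshteinDistance p q == 1))).map (fun q => (p, q))
        = (rest.filter (fun q => levenshteinDistance p q == 1)).map (fun q => (p, q)) := by
      congr 1
      rw [hks, List.filter_append]
      have h1 : seen.filter (fun q => !seen.contains q && (levenshteinDistance p q == 1)) = [] := by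
        refine List.filter_eq_nil_iff.mpr (fun q hq => ?_)
        simp [hq]
      have h2 : (p :: rest).filter (fun q => !seen.contains q && (levenshteinDistance p q == 1))
          = rest.filter (fun q => levenshteinDistance p q == 1) := by
        rw [List.filter_cons]
        have hself : (!seen.contains p && (levenshteinDistance p p == 1)) = false := by
          simp [lev_self]
        rw [hself]
        simp only [Bool.false_eq_true, if_false]
        refine List.filter_congr (fun q hq => ?_)
        have : q ∉ seen := fun h => hdisj h (by simp [hq])
        simp [this]
      rw [h1, h2, List.nil_append]
    simp only [List.foldl_cons, hfold]
    rw [ih (seen ++ [p]) _ ac' (by simpa using hks) ?_]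
    · rw [hE]
      show triB rest _ = triB (p :: rest) out
      have hBfilter : rest.filter (fun q => levB p q == 1)
          = rest.filter (fun q => levenshteinDistance p q == 1) :=
        List.filter_congr (fun q _ => by rw [lev_AB])
      simp only [triB, triB_foldl, hBfilter]
    · intro x y
      rw [hchar' x y]
      simp only [List.mem_append, List.mem_singleton]
      constructor
      · rintro (h | h | ⟨rfl, h⟩ | ⟨rfl, h⟩) <;> tauto
      · rintro (⟨(h | rfl), hy⟩ | ⟨(h | rfl), hy⟩) <;> tauto

theorem ports_eq (dic : List (String × Int)) :
    union_similiar_terms dic = union_similiar_terms_alt dic := by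
  unfold union_similiar_terms union_similiar_terms_alt
  exact outer_spec _ (PySem.List.nodup_dedup _) _ [] [] [] rfl (fun x y => by simp)

-- ===== VERDICT (by name: the statement is the Claim_ definition above) =====
theorem union_similiar_terms_spec : Claim_equal_union_similiar_terms := by
  intro dic _
  unfold Spec_union_similiar_terms
  exact ports_eq dic
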